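-- pv_equiv track=rewrite | github.com/gouravshaw2014/Automaton-Tools | CCA/cca.py | convert
-- ===== SOURCE A (Python) =====
-- from collections import deque, defaultdict
-- from collections import defaultdict
--
-- def convert(T):
--     '''
--     Convert to CCA_T format for optimaized selction of next states
--         {('q0', 'a'): ((('=', 0), '+1', {'q1', 'q0'}), (('=', 1), '0', {'q1'})),
--         ('q0', 'b'): ((('>=', 0), '0', {'q0'}), (('>=', 0), '0', {'q1'})),
--         ('q1', 'a'): ((('>=', 0), '0', {'q1'}),),
--         ('q1', 'b'): ((('>=', 0), '0', {'q1'}),)}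
--
--     '''
--     temp = defaultdict(set)
--
--     # Merge transitions with same (state, symbol, condition, instruction)
--     for state, symbol, condition, instruction, next_states in T:
--         key = (state, symbol, condition, instruction)
--         temp[key].update(next_states)
--
--     # Convert to final CCA_T format
--     grouped = defaultdict(list)
--     for (state, symbol, condition, instruction), next_states in temp.items():
--         grouped[(state, symbol)].append((condition, instruction, next_states))
--
--     # Convert lists to tuples for consistency
--     for key in grouped:
--         grouped[key] = tuple(grouped[key])
--
--     return dict(grouped)
-- ===== SOURCE B (Python) =====
-- def convert(T):
--     '''
--     Convert to CCA_T format with no dictionaries: deduplicate (state, symbol)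
--     pairs in first-occurrence order, then for each group rescan its matching
--     transitions, deduplicating (condition, instruction) heads and unioning
--     their next-state sets.
--     '''
--     def dedup(pairs):
--         out = []
--         for p in pairs:
--             if p not in out:
--                 out.append(p)
--         return out
--
--     result = {}
--     for state, symbol in dedup([(t[0], t[1]) for t in T]):
--         rows = [t for t in T if t[0] == state and t[1] == symbol]
--         entries = []
--         for condition, instruction in dedup([(t[2], t[3]) for t in rows]):
--             ns = set()
--             for t in rows:
--                 if t[2] == condition and t[3] == instruction:
--                     ns.update(t[4])
--             entries.append((condition, instruction, ns))
--         result[(state, symbol)] = tuple(entries)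
--     return result
-- ===== Notes on version B (the rewrite author's own statement) =====
-- stated objective: alternative
-- what changed: A builds two dictionaries (a defaultdict(set) keyed by the full 4-tuple, then regroups its items into a defaultdict(list)); B uses no dictionaries at all: it deduplicates (state,symbol) pairs in first-occurrence order and, for each group, rescans the matching transitions to deduplicate (condition,instruction) heads and union their next-state sets.
import Mathlib
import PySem

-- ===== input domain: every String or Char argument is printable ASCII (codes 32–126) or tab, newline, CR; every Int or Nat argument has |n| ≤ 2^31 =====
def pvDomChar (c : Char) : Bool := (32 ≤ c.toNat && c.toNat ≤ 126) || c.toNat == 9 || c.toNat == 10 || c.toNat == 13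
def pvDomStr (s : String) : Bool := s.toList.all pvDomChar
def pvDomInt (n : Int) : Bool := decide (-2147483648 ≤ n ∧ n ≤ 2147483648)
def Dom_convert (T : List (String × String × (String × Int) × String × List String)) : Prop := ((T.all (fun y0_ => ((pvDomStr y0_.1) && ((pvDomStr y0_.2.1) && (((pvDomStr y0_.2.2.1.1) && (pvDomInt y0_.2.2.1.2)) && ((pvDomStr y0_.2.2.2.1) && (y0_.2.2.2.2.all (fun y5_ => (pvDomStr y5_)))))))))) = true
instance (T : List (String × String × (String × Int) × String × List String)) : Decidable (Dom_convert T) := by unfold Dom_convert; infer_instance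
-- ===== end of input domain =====

-- B replaces A's dictionary-based merge-and-regroup by dictionary-free nested scans with
-- first-occurrence dedup; return values are proved equal (A mutates nothing, so no side-effect gap).

-- ===== PORT A =====
-- A: phase 1 builds temp : defaultdict(set) keyed by the full (state,symbol,condition,instruction);
--    phase 2 regroups temp.items() by (state,symbol); tuple() conversion keeps each list as is,
--    and dict(grouped) is grouped's items.
def convert (T : List (String × String × (String × Int) × String × List String)) : List (String × String × List ((String × Int) × String × List String)) :=
  let temp : PySem.Dict (String × String × (String × Int) × String) (PySem.Set String) :=
    T.foldl (fun d t =>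
      d.insert (t.1, t.2.1, t.2.2.1, t.2.2.2.1)
        (PySem.Set.update (d.getD (t.1, t.2.1, t.2.2.1, t.2.2.2.1) PySem.Set.empty) t.2.2.2.2))
      PySem.Dict.empty
  let grouped : PySem.Dict (String × String) (List ((String × Int) × String × List String)) :=
    temp.items.foldl (fun g p =>
      g.insert (p.1.1, p.1.2.1)
        (g.getD (p.1.1, p.1.2.1) [] ++ [(p.1.2.2.1, p.1.2.2.2, p.2)]))
      PySem.Dict.empty
  grouped.items.map (fun p => (p.1.1, p.1.2, p.2))

-- ===== PORT B =====
-- B: no dicts.  `dedup` (an append-if-absent loop) is exactly PySem.Set's add-fold; the result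
--    dict's keys (the deduped (state,symbol) pairs) are distinct, so building it appends in order:
--    its items are this map.
def convert_alt (T : List (String × String × (String × Int) × String × List String)) : List (String × String × List ((String × Int) × String × List String)) :=
  let dedupSS : List (String × String) :=
    (T.map (fun t => (t.1, t.2.1))).foldl (fun out p => if out.contains p then out else out ++ [p]) []
  dedupSS.map (fun ss =>
    let rows := T.filter (fun t => t.1 == ss.1 && t.2.1 == ss.2)
    let dedupCI : List ((String × Int) × String) :=
      (rows.map (fun t => (t.2.2.1, t.2.2.2.1))).foldl (fun out p => if out.contains p then out else out ++ [p]) []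
    (ss.1, ss.2, dedupCI.map (fun ci =>
      (ci.1, ci.2,
        rows.foldl (fun ns t =>
          if t.2.2.1 == ci.1 && t.2.2.2.1 == ci.2 then PySem.Set.update ns t.2.2.2.2 else ns)
          PySem.Set.empty))))

-- ===== PRECONDITION & SPEC =====
def Spec_convert (T : List (String × String × (String × Int) × String × List String)) (out : List (String × String × List ((String × Int) × String × List String))) : Prop := out = convert_alt T
instance (T : List (String × String × (String × Int) × String × List String)) (out : List (String × String × List ((String × Int) × String × List String))) : Decidable (Spec_convert T out) := by
  unfold Spec_convert
  haveI : DecidableEq (List String) := instDecidableEqList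
  haveI : DecidableEq ((String × Int) × String × List String) := instDecidableEqProd
  haveI : DecidableEq (List ((String × Int) × String × List String)) := instDecidableEqList
  haveI : DecidableEq (String × String × List ((String × Int) × String × List String)) := instDecidableEqProd
  exact instDecidableEqList _ _

-- ===== CLAIM (what is proved, stated in full; the proofs are below) =====
def Claim_equal_convert : Prop := ∀ (T : List (String × String × (String × Int) × String × List String)), Dom_convert T → Spec_convert T (convert T)

-- ===== LEMMAS AND PROOFS =====

-- Abbreviations used only by the proofs
abbrev PVFK := String × String × (String × Int) × String
abbrev PVTrans := String × String × (String × Int) × String × List String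

def pvFk (t : PVTrans) : PVFK := (t.1, t.2.1, t.2.2.1, t.2.2.2.1)

-- A's phase-1 step
def pvStepA (d : PySem.Dict PVFK (PySem.Set String)) (t : PVTrans) : PySem.Dict PVFK (PySem.Set String) :=
  d.insert (pvFk t) (PySem.Set.update (d.getD (pvFk t) PySem.Set.empty) t.2.2.2.2)

-- The merged next-state set of one full key
def pvSetFor (T : List PVTrans) (k : PVFK) : PySem.Set String :=
  (T.filter (fun t => pvFk t == k)).foldl (fun s t => PySem.Set.update s t.2.2.2.2) PySem.Set.empty

-- nodup keys → items = keys paired with getD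
lemma pv_items_eq_keys_map {κ ν : Type} [BEq κ] [LawfulBEq κ] (d : PySem.Dict κ ν) (dflt : ν)
    (h : d.keys.Nodup) : d.items = d.keys.map (fun k => (k, d.getD k dflt)) := by
  have hk : d.keys = d.items.map Prod.fst := rfl
  apply List.ext_getElem
  · simp [hk]
  · intro i h1 h2
    have hm : d.items[i] ∈ d.items := List.getElem_mem _
    have hg : d.getD d.items[i].1 dflt = d.items[i].2 :=
      PySem.Dict.getD_of_mem_items d (by exact hm) h dflt
    simp [hk, List.getElem_map, hg]

-- canonical form of a modify-append grouping loop
lemma pv_group_items {κ β π' : Type} [BEq κ] [LawfulBEq κ] (L : List β) (key : β → κ) (pay : β → π') :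
    (L.foldl (fun d p => d.modify (key p) [] (fun l => l ++ [pay p])) PySem.Dict.empty).items
      = (PySem.Set.ofList (L.map key)).map (fun c => (c, (L.filter (fun p => key p == c)).map pay)) := by
  have hfold :
      (L.foldl (fun d p => d.modify (key p) [] (fun l => l ++ [pay p])) PySem.Dict.empty)
        = ((L.map (fun p => (key p, pay p))).foldl
            (fun d q => d.modify q.1 [] (fun l => l ++ [q.2])) PySem.Dict.empty) := by
    rw [List.foldl_map]
  have hkeys :
      (L.foldl (fun d p => d.modify (key p) [] (fun l => l ++ [pay p])) PySem.Dict.empty).keys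
        = PySem.Set.ofList (L.map key) := by
    have := PySem.Dict.keys_foldl_modify_key L key ([] : List π')
      (fun _ p => fun l => l ++ [pay p]) PySem.Dict.empty
    simpa [PySem.Dict.keys_empty] using this
  have hnodup :
      (L.foldl (fun d p => d.modify (key p) [] (fun l => l ++ [pay p])) PySem.Dict.empty).keys.Nodup := by
    rw [hkeys]; exact PySem.Set.nodup_ofList _
  rw [pv_items_eq_keys_map _ ([] : List π') hnodup, hkeys]
  apply List.map_congr_left
  intro c _
  have hgetD :
      (L.foldl (fun d p => d.modify (key p) [] (fun l => l ++ [pay p])) PySem.Dict.empty).getD c []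
        = (L.filter (fun p => key p == c)).map pay := by
    rw [hfold, PySem.Dict.getD_foldl_modify_append]
    have : (List.filter (fun q => q.1 == c) (L.map (fun p => (key p, pay p))))
        = (L.filter (fun p => key p == c)).map (fun p => (key p, pay p)) := by
      rw [List.filter_map]; rfl
    simp [PySem.Dict.getD_empty, this, List.map_map, Function.comp]
  rw [hgetD]

-- one key of A's phase-1 dict accumulates exactly the filtered update-fold
lemma pv_getD_temp (T : List PVTrans) (k : PVFK) : ∀ (d : PySem.Dict PVFK (PySem.Set String)),
    (T.foldl pvStepA d).getD k PySem.Set.empty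
      = (T.filter (fun t => pvFk t == k)).foldl (fun s t => PySem.Set.update s t.2.2.2.2)
          (d.getD k PySem.Set.empty) := by
  induction T with
  | nil => intro d; rfl
  | cons t T ih =>
    intro d
    rw [List.foldl_cons, ih]
    by_cases h : pvFk t = k
    · have hb : (pvFk t == k) = true := by simp [h]
      simp only [List.filter_cons, hb, if_pos]
      rw [List.foldl_cons]
      have : (pvStepA d t).getD k PySem.Set.empty
          = PySem.Set.update (d.getD k PySem.Set.empty) t.2.2.2.2 := by
        unfold pvStepA; rw [h, PySem.Dict.getD_insert_self]
      rw [this]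
    · have hb : (pvFk t == k) = false := by simp [h]
      simp only [List.filter_cons, hb, Bool.false_eq_true, if_neg, not_false_iff]
      have : (pvStepA d t).getD k PySem.Set.empty = d.getD k PySem.Set.empty := by
        unfold pvStepA
        exact PySem.Dict.getD_insert_of_ne d _ _ (Ne.symm h)
      rw [this]

-- items of A's phase-1 dict: deduped full keys, each with its merged set
lemma pv_temp_items (T : List PVTrans) :
    (T.foldl pvStepA PySem.Dict.empty).items
      = (PySem.Set.ofList (T.map pvFk)).map (fun k => (k, pvSetFor T k)) := by
  have hkeys : (T.foldl pvStepA PySem.Dict.empty).keys = PySem.Set.ofList (T.map pvFk) := by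
    have := PySem.Dict.keys_foldl_insert_key T pvFk
      (fun d t => PySem.Set.update (d.getD (pvFk t) PySem.Set.empty) t.2.2.2.2)
      (PySem.Dict.empty : PySem.Dict PVFK (PySem.Set String))
    simpa [PySem.Dict.keys_empty] using this
  have hnodup : (T.foldl pvStepA PySem.Dict.empty).keys.Nodup := by
    rw [hkeys]; exact PySem.Set.nodup_ofList _
  rw [pv_items_eq_keys_map _ PySem.Set.empty hnodup, hkeys]
  apply List.map_congr_left
  intro k _
  rw [pv_getD_temp T k PySem.Dict.empty]
  rfl

-- Set.add and Set.ofList building blocks (specific snoc/membership forms used below)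
lemma pv_add_of_mem {α : Type} [BEq α] [LawfulBEq α] (s : PySem.Set α) (x : α) (h : x ∈ s) :
    PySem.Set.add s x = s := by
  simp [PySem.Set.add, PySem.Set.contains, h]

lemma pv_add_of_not_mem {α : Type} [BEq α] [LawfulBEq α] (s : PySem.Set α) (x : α) (h : x ∉ s) :
    PySem.Set.add s x = s ++ [x] := by
  simp [PySem.Set.add, PySem.Set.contains, h]

lemma pv_ofList_snoc {α : Type} [BEq α] (l : List α) (x : α) :
    PySem.Set.ofList (l ++ [x]) = PySem.Set.add (PySem.Set.ofList l) x := by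
  rw [PySem.Set.ofList_eq_foldl, PySem.Set.ofList_eq_foldl, List.foldl_append]; rfl

-- dedup (Set.ofList) commutes with map along the list
lemma pv_ofList_map_ofList {α β : Type} [BEq α] [LawfulBEq α] [BEq β] [LawfulBEq β]
    (f : α → β) (l : List α) :
    PySem.Set.ofList ((PySem.Set.ofList l).map f) = PySem.Set.ofList (l.map f) := by
  induction l using List.reverseRecOn with
  | nil => rfl
  | append_singleton l x ih =>
    rw [pv_ofList_snoc, List.map_append, List.map_singleton, pv_ofList_snoc]
    by_cases h : x ∈ (PySem.Set.ofList l : List α)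
    · have hfx : f x ∈ (PySem.Set.ofList (l.map f) : List β) :=
        (PySem.Set.mem_ofList _ _).mpr (List.mem_map_of_mem ((PySem.Set.mem_ofList _ _).mp h))
      rw [pv_add_of_mem _ _ h, ih, pv_add_of_mem _ _ hfx]
    · rw [pv_add_of_not_mem _ _ h, List.map_append, List.map_singleton, pv_ofList_snoc, ih]

-- dedup commutes with filter
lemma pv_filter_ofList {α : Type} [BEq α] [LawfulBEq α] (p : α → Bool) (l : List α) :
    (PySem.Set.ofList l : List α).filter p = PySem.Set.ofList (l.filter p) := by
  induction l using List.reverseRecOn with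
  | nil => rfl
  | append_singleton l x ih =>
    rw [pv_ofList_snoc, List.filter_append]
    by_cases h : x ∈ (PySem.Set.ofList l : List α)
    · rw [pv_add_of_mem _ _ h, ih]
      by_cases hp : p x = true
      · have hxf : x ∈ (PySem.Set.ofList (l.filter p) : List α) :=
          (PySem.Set.mem_ofList _ _).mpr
            (List.mem_filter.mpr ⟨(PySem.Set.mem_ofList _ _).mp h, hp⟩)
        simp only [List.filter_cons, hp, if_pos, List.filter_nil]
        rw [pv_ofList_snoc, pv_add_of_mem _ _ hxf]
      · simp only [List.filter_cons, hp, Bool.false_eq_true, if_neg, not_false_iff,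
          List.filter_nil, List.append_nil]
    · rw [pv_add_of_not_mem _ _ h, List.filter_append, ih]
      by_cases hp : p x = true
      · have hxf : x ∉ (PySem.Set.ofList (l.filter p) : List α) := by
          intro hmem
          exact h ((PySem.Set.mem_ofList _ _).mpr
            (List.mem_filter.mp ((PySem.Set.mem_ofList _ _).mp hmem)).1)
        simp only [List.filter_cons, hp, if_pos, List.filter_nil]
        rw [pv_ofList_snoc, pv_add_of_not_mem _ _ hxf]
      · simp only [List.filter_cons, hp, Bool.false_eq_true, if_neg, not_false_iff,
          List.filter_nil, List.append_nil]

-- mapping an (on-the-list) injective function commutes with dedup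
lemma pv_map_ofList_of_inj {α β : Type} [BEq α] [LawfulBEq α] [BEq β] [LawfulBEq β]
    (f : α → β) (l : List α) (hinj : ∀ x ∈ l, ∀ y ∈ l, f x = f y → x = y) :
    (PySem.Set.ofList l : List α).map f = PySem.Set.ofList (l.map f) := by
  induction l using List.reverseRecOn with
  | nil => rfl
  | append_singleton l x ih =>
    have hinj' : ∀ a ∈ l, ∀ b ∈ l, f a = f b → a = b := fun a ha b hb =>
      hinj a (List.mem_append_left _ ha) b (List.mem_append_left _ hb)
    rw [pv_ofList_snoc, List.map_append, List.map_singleton, pv_ofList_snoc]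
    by_cases h : x ∈ (PySem.Set.ofList l : List α)
    · have hfx : f x ∈ (PySem.Set.ofList (l.map f) : List β) :=
        (PySem.Set.mem_ofList _ _).mpr (List.mem_map_of_mem ((PySem.Set.mem_ofList _ _).mp h))
      rw [pv_add_of_mem _ _ h, ih hinj', pv_add_of_mem _ _ hfx]
    · have hfx : f x ∉ (PySem.Set.ofList (l.map f) : List β) := by
        intro hmem
        obtain ⟨y, hy, hfy⟩ := List.mem_map.mp ((PySem.Set.mem_ofList _ _).mp hmem)
        have hyx := hinj y (List.mem_append_left _ hy) x
          (List.mem_append_right _ (List.mem_singleton.mpr rfl)) hfy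
        exact h ((PySem.Set.mem_ofList _ _).mpr (hyx ▸ hy))
      rw [pv_add_of_not_mem _ _ h, List.map_append, List.map_singleton, pv_add_of_not_mem _ _ hfx, ih hinj']

-- the deduped full keys, paired with their merged sets (A's phase-1 items, by pv_temp_items)
def pvKSm (T : List PVTrans) : List (PVFK × PySem.Set String) :=
  (PySem.Set.ofList (T.map pvFk) : List PVFK).map (fun k => (k, pvSetFor T k))

-- ===== VERDICT (by name: the statement is the Claim_ definition above) =====
theorem convert_spec : Claim_equal_convert := by
  intro T _
  unfold Spec_convert
  -- A in canonical form: deduped (state,symbol) keys, each with its filtered entry list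
  have hAc : convert T
      = (PySem.Set.ofList ((pvKSm T).map (fun p => (p.1.1, p.1.2.1))) :
          List (String × String)).map (fun c =>
            (c.1, c.2, ((pvKSm T).filter (fun p => (p.1.1, p.1.2.1) == c)).map
              (fun p => (p.1.2.2.1, p.1.2.2.2, p.2)))) := by
    show ((T.foldl pvStepA PySem.Dict.empty).items.foldl
        (fun d p => d.modify (p.1.1, p.1.2.1) [] (fun l => l ++ [(p.1.2.2.1, p.1.2.2.2, p.2)]))
        PySem.Dict.empty).items.map (fun p => (p.1.1, p.1.2, p.2)) = _
    rw [pv_group_items ((T.foldl pvStepA PySem.Dict.empty).items)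
          (fun p => (p.1.1, p.1.2.1)) (fun p => (p.1.2.2.1, p.1.2.2.2, p.2)),
        pv_temp_items, List.map_map]
    rfl
  -- the two key lists coincide
  have hkeys : PySem.Set.ofList ((pvKSm T).map (fun p => (p.1.1, p.1.2.1)))
      = PySem.Set.ofList (T.map (fun t => (t.1, t.2.1))) := by
    show PySem.Set.ofList (((PySem.Set.ofList (T.map pvFk) : List PVFK).map
        (fun k => (k, pvSetFor T k))).map (fun p => (p.1.1, p.1.2.1))) = _
    rw [List.map_map]
    show PySem.Set.ofList ((PySem.Set.ofList (T.map pvFk) : List PVFK).map (fun k => (k.1, k.2.1))) = _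
    rw [pv_ofList_map_ofList, List.map_map]
    rfl
  rw [hAc, hkeys]
  -- B in canonical form is definitionally the same outer map; compare groupwise
  refine List.map_congr_left ?_
  intro c hc
  refine congrArg (fun l => (c.1, c.2, l)) ?_
  -- the full keys of this group, in first-occurrence order
  have hcomp : ∀ k ∈ (T.filter (fun t => t.1 == c.1 && t.2.1 == c.2)).map pvFk,
      k.1 = c.1 ∧ k.2.1 = c.2 := by
    intro k hk
    obtain ⟨t, ht, rfl⟩ := List.mem_map.mp hk
    have h2 := (List.mem_filter.mp ht).2
    simp only [Bool.and_eq_true, beq_iff_eq] at h2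
    exact ⟨h2.1, h2.2⟩
  have hKSf : ((pvKSm T).filter (fun p => (p.1.1, p.1.2.1) == c)).map
        (fun p => (p.1.2.2.1, p.1.2.2.2, p.2))
      = (PySem.Set.ofList ((T.filter (fun t => t.1 == c.1 && t.2.1 == c.2)).map pvFk) :
          List PVFK).map (fun k => (k.2.2.1, k.2.2.2, pvSetFor T k)) := by
    show (((PySem.Set.ofList (T.map pvFk) : List PVFK).map (fun k => (k, pvSetFor T k))).filter
        (fun p => (p.1.1, p.1.2.1) == c)).map (fun p => (p.1.2.2.1, p.1.2.2.2, p.2)) = _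
    rw [List.filter_map, List.map_map]
    show ((PySem.Set.ofList (T.map pvFk) : List PVFK).filter (fun k => (k.1, k.2.1) == c)).map
        (fun k => (k.2.2.1, k.2.2.2, pvSetFor T k)) = _
    rw [pv_filter_ofList, List.filter_map]
    rfl
  rw [hKSf]
  -- split each entry into its (condition,instruction) head and the merged set
  have hsplit : (PySem.Set.ofList ((T.filter (fun t => t.1 == c.1 && t.2.1 == c.2)).map pvFk) :
        List PVFK).map (fun k => (k.2.2.1, k.2.2.2, pvSetFor T k))
      = ((PySem.Set.ofList ((T.filter (fun t => t.1 == c.1 && t.2.1 == c.2)).map pvFk) :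
          List PVFK).map (fun k => (k.2.2.1, k.2.2.2))).map (fun ci =>
            (ci.1, ci.2,
              (T.filter (fun t => t.1 == c.1 && t.2.1 == c.2)).foldl
                (fun ns t => if t.2.2.1 == ci.1 && t.2.2.2.1 == ci.2
                  then PySem.Set.update ns t.2.2.2.2 else ns) PySem.Set.empty)) := by
    rw [List.map_map]
    refine List.map_congr_left ?_
    intro k hk
    obtain ⟨hk1, hk2⟩ := hcomp k ((PySem.Set.mem_ofList _ _).mp hk)
    refine congrArg (fun s => (k.2.2.1, k.2.2.2, s)) ?_
    rw [PySem.List.foldl_if_eq_foldl_filter, List.filter_filter]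
    unfold pvSetFor
    refine congrArg (fun l : List PVTrans => List.foldl (fun ns t => PySem.Set.update ns t.2.2.2.2) PySem.Set.empty l) ?_
    refine List.filter_congr ?_
    intro t _
    obtain ⟨k1, k2, ci1, ci2⟩ := k
    simp only at hk1 hk2
    subst hk1; subst hk2
    show (t.1 == c.1 && (t.2.1 == c.2 && (t.2.2.1 == ci1 && t.2.2.2.1 == ci2)))
        = ((t.2.2.1 == ci1 && t.2.2.2.1 == ci2) && (t.1 == c.1 && t.2.1 == c.2))
    cases t.1 == c.1 <;> cases t.2.1 == c.2 <;> cases t.2.2.1 == ci1 <;> cases t.2.2.2.1 == ci2 <;> rfl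
  rw [hsplit]
  -- dedup of the heads equals the heads of the dedup (the head map is injective on this group)
  have hinj : ∀ x ∈ (T.filter (fun t => t.1 == c.1 && t.2.1 == c.2)).map pvFk,
      ∀ y ∈ (T.filter (fun t => t.1 == c.1 && t.2.1 == c.2)).map pvFk,
      (x.2.2.1, x.2.2.2) = (y.2.2.1, y.2.2.2) → x = y := by
    intro x hx y hy hxy
    obtain ⟨hx1, hx2⟩ := hcomp x hx
    obtain ⟨hy1, hy2⟩ := hcomp y hy
    obtain ⟨x1, x2, x3, x4⟩ := x
    obtain ⟨y1, y2, y3, y4⟩ := y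
    simp only [Prod.mk.injEq] at hxy ⊢
    simp only at hx1 hx2 hy1 hy2
    exact ⟨hx1.trans hy1.symm, hx2.trans hy2.symm, hxy.1, hxy.2⟩
  rw [pv_map_ofList_of_inj _ _ hinj, List.map_map]
  rfl
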